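-- pv_equiv track=rewrite | github.com/spbu-se/pldoctoolkit | doc-clone-miner/TextDuplicateSearch/DuplicateSearch/StrictSearch/SuffixArray.py | less
-- ===== SOURCE A (Python) =====
-- from typing import List, Tuple, Dict
--
-- def safe_idx(x: List[int], i: int) -> int:
--     return 0 if i >= len(x) else x[i]
--
-- def less(x: List[int], i: int, j: int, ISA: Dict[int, int]) -> bool:
--     a: int = safe_idx(x, i)
--     b: int = safe_idx(x, j)
--     if a < b:
--         return True
--     if a > b:
--         return False
--     if i % 3 != 0 and j % 3 != 0:
--         return ISA[i] < ISA[j]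
--
--     return less(x, i + 1, j + 1, ISA)
-- ===== SOURCE B (Python) =====
-- def safe_idx(x, i):
--     return 0 if i >= len(x) else x[i]
--
--
-- def less(x, i, j, ISA):
--     # Among the offsets t = 0, 1, 2 there is always one with both (i+t) % 3 != 0
--     # and (j+t) % 3 != 0, so the recursion in the original runs at most three
--     # steps; do exactly those steps as a bounded scan.
--     for t in range(3):
--         a = safe_idx(x, i + t)
--         b = safe_idx(x, j + t)
--         if a != b:
--             return a < b
--         if (i + t) % 3 != 0 and (j + t) % 3 != 0:
--             return ISA[i + t] < ISA[j + t]
-- ===== Notes on version B (the rewrite author's own statement) =====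
-- stated objective: simpler
-- what changed: B replaces A's unbounded tail recursion by a bounded scan of exactly three steps, using the observation that among offsets t=0,1,2 one always has both (i+t)%3 and (j+t)%3 nonzero, so A's recursion never goes deeper than three calls.
import Mathlib
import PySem

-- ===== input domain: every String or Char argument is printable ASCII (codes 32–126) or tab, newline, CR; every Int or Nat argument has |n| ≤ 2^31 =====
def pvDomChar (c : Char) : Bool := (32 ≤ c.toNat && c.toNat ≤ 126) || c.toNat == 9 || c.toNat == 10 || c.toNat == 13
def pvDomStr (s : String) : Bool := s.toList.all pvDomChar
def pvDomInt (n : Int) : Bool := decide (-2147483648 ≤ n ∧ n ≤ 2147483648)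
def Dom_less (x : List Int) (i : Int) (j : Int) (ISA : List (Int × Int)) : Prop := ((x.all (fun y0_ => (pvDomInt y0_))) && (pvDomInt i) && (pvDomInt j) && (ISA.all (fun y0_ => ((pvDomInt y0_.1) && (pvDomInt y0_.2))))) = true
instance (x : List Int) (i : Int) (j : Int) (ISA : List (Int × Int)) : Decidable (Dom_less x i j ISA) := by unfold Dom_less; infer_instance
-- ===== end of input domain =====

-- B replaces A's unbounded tail recursion by a bounded three-step scan (among
-- offsets t = 0,1,2 one always has both residues mod 3 nonzero, so A's recursion
-- never goes deeper); objective: alternative/simpler control flow, same values.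

-- ===== PORT A =====
-- safe_idx: 0 if i >= len(x) else x[i]; a negative i out of range is an
-- IndexError in Python (pyGet? = none), excluded by Pre_; .getD 0 there is dead.
def safeIdx (x : List Int) (i : Int) : Int :=
  if i ≥ (x.length : Int) then 0 else (PySem.List.pyGet? x i).getD 0

-- termination measure for A's recursion: steps until both residues mod 3 are nonzero (≤ 2)
def lessMeasure (i j : Int) : Nat :=
  if PySem.Int.mod i 3 ≠ 0 ∧ PySem.Int.mod j 3 ≠ 0 then 0
  else if PySem.Int.mod (i + 1) 3 ≠ 0 ∧ PySem.Int.mod (j + 1) 3 ≠ 0 then 1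
  else 2

-- cited by name in less's decreasing_by
theorem lessMeasure_dec (i j : Int)
    (h : ¬(PySem.Int.mod i 3 ≠ 0 ∧ PySem.Int.mod j 3 ≠ 0)) :
    lessMeasure (i + 1) (j + 1) < lessMeasure i j := by
  simp only [lessMeasure, PySem.Int.mod_eq_emod_of_pos (by norm_num : (0:Int) < 3)] at *
  split_ifs <;> omega

-- literal port of A: ISA[k] is (Dict.mk ISA).get? k; KeyError (none) excluded by Pre_
def less (x : List Int) (i : Int) (j : Int) (ISA : List (Int × Int)) : Bool :=
  let a := safeIdx x i
  let b := safeIdx x j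
  if a < b then true
  else if a > b then false
  else if PySem.Int.mod i 3 ≠ 0 ∧ PySem.Int.mod j 3 ≠ 0 then
    decide (((PySem.Dict.mk ISA).get? i).getD 0 < ((PySem.Dict.mk ISA).get? j).getD 0)
  else less x (i + 1) (j + 1) ISA
termination_by lessMeasure i j
decreasing_by exact lessMeasure_dec i j (by assumption)

-- ===== PORT B =====
-- B's 'for t in range(3)' loop; [] = loop exhausted (unreachable: some t ≤ 2 takes a return)
def lessAltLoop (x : List Int) (i : Int) (j : Int) (ISA : List (Int × Int)) : List Int → Bool
  | [] => false
  | t :: ts =>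
    let a := safeIdx x (i + t)
    let b := safeIdx x (j + t)
    if a ≠ b then decide (a < b)
    else if PySem.Int.mod (i + t) 3 ≠ 0 ∧ PySem.Int.mod (j + t) 3 ≠ 0 then
      decide (((PySem.Dict.mk ISA).get? (i + t)).getD 0 < ((PySem.Dict.mk ISA).get? (j + t)).getD 0)
    else lessAltLoop x i j ISA ts

def less_alt (x : List Int) (i : Int) (j : Int) (ISA : List (Int × Int)) : Bool :=
  lessAltLoop x i j ISA (PySem.List.pyRange 0 3 1)

-- ===== PRECONDITION & SPEC =====
-- step t of the (≤ 3-step) run raises nothing: both indices ≥ -len (no IndexError),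
-- and if the ISA branch fires at t (equal values, both residues nonzero) both keys exist
def pvStepOK (x : List Int) (i : Int) (j : Int) (ISA : List (Int × Int)) (t : Int) : Bool :=
  decide (-(x.length : Int) ≤ i + t) && decide (-(x.length : Int) ≤ j + t) &&
  (!(safeIdx x (i + t) == safeIdx x (j + t) &&
     decide (PySem.Int.mod (i + t) 3 ≠ 0) && decide (PySem.Int.mod (j + t) 3 ≠ 0)) ||
   ((PySem.Dict.mk ISA).contains (i + t) && (PySem.Dict.mk ISA).contains (j + t)))

-- step t falls through to step t+1: equal values and not both residues nonzero
def pvProceed (x : List Int) (i : Int) (j : Int) (t : Int) : Bool :=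
  (safeIdx x (i + t) == safeIdx x (j + t)) &&
  !(decide (PySem.Int.mod (i + t) 3 ≠ 0) && decide (PySem.Int.mod (j + t) 3 ≠ 0))

-- exactly the inputs where A returns (no IndexError from a negative index below -len,
-- no KeyError from a missing ISA key at the step that compares ranks); A's recursion
-- reaches depth at most 3, so the three unrolled steps cover every access A makes
def Pre_less (x : List Int) (i : Int) (j : Int) (ISA : List (Int × Int)) : Prop :=
  (pvStepOK x i j ISA 0 &&
   (!pvProceed x i j 0 || pvStepOK x i j ISA 1) &&
   (!(pvProceed x i j 0 && pvProceed x i j 1) || pvStepOK x i j ISA 2)) = true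
instance (x : List Int) (i : Int) (j : Int) (ISA : List (Int × Int)) : Decidable (Pre_less x i j ISA) := by unfold Pre_less; infer_instance

def pvWitness_less : List Int × Int × Int × (List (Int × Int)) := ([], 1, 2, [(1, 0), (2, 1)])

def Spec_less (x : List Int) (i : Int) (j : Int) (ISA : List (Int × Int)) (out : Bool) : Prop := out = less_alt x i j ISA
instance (x : List Int) (i : Int) (j : Int) (ISA : List (Int × Int)) (out : Bool) : Decidable (Spec_less x i j ISA out) := by unfold Spec_less; infer_instance

-- ===== CLAIM (what is proved, stated in full; the proofs are below) =====
def Claim_equal_less : Prop := ∀ (x : List Int) (i : Int) (j : Int) (ISA : List (Int × Int)), Dom_less x i j ISA → Pre_less x i j ISA → Spec_less x i j ISA (less x i j ISA)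

-- ===== LEMMAS AND PROOFS =====

-- if neither step 0 nor step 1 fires the rank branch, step 2 must (residues mod 3)
theorem good_step2 (i j : Int)
    (h0 : ¬(PySem.Int.mod i 3 ≠ 0 ∧ PySem.Int.mod j 3 ≠ 0))
    (h1 : ¬(PySem.Int.mod (i + 1) 3 ≠ 0 ∧ PySem.Int.mod (j + 1) 3 ≠ 0)) :
    PySem.Int.mod (i + 2) 3 ≠ 0 ∧ PySem.Int.mod (j + 2) 3 ≠ 0 := by
  simp only [PySem.Int.mod_eq_emod_of_pos (by norm_num : (0:Int) < 3)] at *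
  omega

-- one step of A against one step of B's loop (same current offsets)
theorem less_step (x : List Int) (i j : Int) (ISA : List (Int × Int)) (ts : List Int) :
    less x i j ISA = lessAltLoop x i j ISA (0 :: ts) ∨
    (safeIdx x i = safeIdx x j ∧ ¬(PySem.Int.mod i 3 ≠ 0 ∧ PySem.Int.mod j 3 ≠ 0) ∧
      less x i j ISA = less x (i + 1) (j + 1) ISA ∧
      lessAltLoop x i j ISA (0 :: ts) = lessAltLoop x i j ISA ts) := by
  by_cases hab : safeIdx x i = safeIdx x j
  · by_cases hg : PySem.Int.mod i 3 ≠ 0 ∧ PySem.Int.mod j 3 ≠ 0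
    · left
      have hdi : ¬(3:Int) ∣ i := fun hd => hg.1 ((PySem.Int.mod_eq_zero_iff_dvd i 3).mpr hd)
      have hdj : ¬(3:Int) ∣ j := fun hd => hg.2 ((PySem.Int.mod_eq_zero_iff_dvd j 3).mpr hd)
      rw [less, lessAltLoop]
      simp [hab, hdi, hdj]
    · right
      have hgd : ¬(¬(3:Int) ∣ i ∧ ¬(3:Int) ∣ j) := by
        simpa [not_iff_not.mpr (PySem.Int.mod_eq_zero_iff_dvd i 3),
               not_iff_not.mpr (PySem.Int.mod_eq_zero_iff_dvd j 3)] using hg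
      refine ⟨hab, hg, ?_, ?_⟩
      · rw [less]; simp [hab, hgd]
      · rw [lessAltLoop]; simp [hab, hgd]
  · left
    rw [less, lessAltLoop]
    rcases lt_trichotomy (safeIdx x i) (safeIdx x j) with h | h | h
    · simp [hab, h, add_zero]
    · exact absurd h hab
    · simp [hab, h, not_lt_of_gt h, add_zero]

-- B's loop at offsets shifted by one: step body at t over (i+1,j+1) equals body at t+1 over (i,j)
theorem lessAltLoop_shift (x : List Int) (i j : Int) (ISA : List (Int × Int)) (ts : List Int) :
    lessAltLoop x (i + 1) (j + 1) ISA ts = lessAltLoop x i j ISA (ts.map (· + 1)) := by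
  induction ts with
  | nil => rfl
  | cons t ts ih =>
    have e1 : i + 1 + t = i + (t + 1) := by ring
    have e2 : j + 1 + t = j + (t + 1) := by ring
    simp only [List.map_cons, lessAltLoop, e1, e2, ih]

-- ===== VERDICT (by name: the statement is the Claim_ definition above) =====
theorem less_spec : Claim_equal_less := by
  intro x i j ISA _ hpre
  show less x i j ISA = less_alt x i j ISA
  have hr : PySem.List.pyRange 0 3 1 = [0, 1, 2] := by decide
  unfold less_alt
  rw [hr]
  -- step 0
  rcases less_step x i j ISA [1, 2] with h0 | ⟨heq0, hg0, ha0, hb0⟩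
  · exact h0
  rw [ha0, hb0]
  -- step 1: rewrite B's remaining loop [1,2] as the loop [0,1] at offsets (i+1, j+1)
  have hsh1 : lessAltLoop x i j ISA [1, 2] = lessAltLoop x (i + 1) (j + 1) ISA [0, 1] := by
    rw [lessAltLoop_shift]; norm_num
  rw [hsh1]
  rcases less_step x (i + 1) (j + 1) ISA [1] with h1 | ⟨heq1, hg1, ha1, hb1⟩
  · exact h1
  rw [ha1, hb1]
  have hsh2 : lessAltLoop x (i + 1) (j + 1) ISA [1] = lessAltLoop x (i + 2) (j + 2) ISA [0] := by
    have : lessAltLoop x (i + 2) (j + 2) ISA [0] = lessAltLoop x (i + 1) (j + 1) ISA [1] := by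
      have e1 : i + 2 = i + 1 + 1 := by ring
      have e2 : j + 2 = j + 1 + 1 := by ring
      rw [e1, e2, lessAltLoop_shift]; norm_num
    exact this.symm
  rw [hsh2]
  -- step 2 always takes the rank branch
  have hg2 := good_step2 i j hg0 (by exact hg1)
  have hg2' : PySem.Int.mod (i + 1 + 1) 3 ≠ 0 ∧ PySem.Int.mod (j + 1 + 1) 3 ≠ 0 := by
    have e1 : i + 1 + 1 = i + 2 := by ring
    have e2 : j + 1 + 1 = j + 2 := by ring
    rw [e1, e2]; exact hg2
  have hdi : ¬(3:Int) ∣ (i + 1 + 1) := fun hd => hg2'.1 ((PySem.Int.mod_eq_zero_iff_dvd _ 3).mpr hd)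
  have hdj : ¬(3:Int) ∣ (j + 1 + 1) := fun hd => hg2'.2 ((PySem.Int.mod_eq_zero_iff_dvd _ 3).mpr hd)
  rw [less, lessAltLoop]
  by_cases hab2 : safeIdx x (i + 1 + 1) = safeIdx x (j + 1 + 1)
  · have e1 : i + 2 + 0 = i + 1 + 1 := by ring
    have e2 : j + 2 + 0 = j + 1 + 1 := by ring
    simp [hab2, hdi, hdj, e1, e2]
  · have e1 : i + 2 + 0 = i + 1 + 1 := by ring
    have e2 : j + 2 + 0 = j + 1 + 1 := by ring
    rcases lt_trichotomy (safeIdx x (i + 1 + 1)) (safeIdx x (j + 1 + 1)) with h | h | h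
    · simp [hab2, h, e1, e2]
    · exact absurd h hab2
    · simp [hab2, h, not_lt_of_gt h, e1, e2]
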